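-- pv_equiv track=rewrite | github.com/NamHoKi/Algorithm-Study | 프로그래머스/unrated/134240. 푸드 파이트 대회/푸드 파이트 대회.py | solution
-- ===== SOURCE A (Python) =====
-- def solution(food):
--     answer = '0'
--
--     for i in range(len(food)-1, 0, -1):
--         n = food[i] // 2
--         if n != 0:
--             for j in range(n):
--                 answer = str(i) + answer + str(i)
--
--     return answer
-- ===== SOURCE B (Python) =====
-- def solution(food):
--     tokens = []
--     for i in range(1, len(food)):
--         tokens += [str(i)] * (food[i] // 2)
--     return ''.join(tokens) + '0' + ''.join(reversed(tokens))
-- ===== Notes on version B (the rewrite author's own statement) =====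
-- stated objective: simpler
-- what changed: Instead of A's descending double loop that repeatedly wraps the accumulator string on both sides (quadratic copying), B makes one ascending pass collecting each str(i) repeated food[i]//2 times as tokens, joins them for the left half, and mirrors the token list (token-wise reversal) for the right half around '0'.
import Mathlib
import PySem

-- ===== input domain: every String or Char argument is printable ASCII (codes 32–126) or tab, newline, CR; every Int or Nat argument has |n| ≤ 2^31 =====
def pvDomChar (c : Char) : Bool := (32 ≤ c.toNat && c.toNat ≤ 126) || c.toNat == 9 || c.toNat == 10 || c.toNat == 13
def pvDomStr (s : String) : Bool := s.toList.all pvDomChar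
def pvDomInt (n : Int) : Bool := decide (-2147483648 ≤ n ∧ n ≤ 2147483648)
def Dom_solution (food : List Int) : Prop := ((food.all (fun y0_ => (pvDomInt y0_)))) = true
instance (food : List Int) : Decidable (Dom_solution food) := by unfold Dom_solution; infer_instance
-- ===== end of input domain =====

-- B computes the left half as a token list in one ascending pass and mirrors it (token-wise
-- reversal), instead of A's repeated two-sided wrapping in a descending double loop: simpler.


-- ===== PORT A =====
-- indices i drawn from range(len(food)-1, 0, -1) are always in range, so pyGetD's default 0 is never used
def solution (food : List Int) : String :=
  (PySem.List.pyRange (PySem.List.len food - 1) 0 (-1)).foldl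
    (fun answer i =>
      let n := PySem.Int.floordiv (PySem.List.pyGetD food i 0) 2
      if n ≠ 0 then
        (PySem.List.pyRange 0 n 1).foldl
          (fun ans _ => PySem.Int.toStr i ++ ans ++ PySem.Int.toStr i) answer
      else answer)
    "0"

-- ===== PORT B =====
-- [str(i)] * (food[i]//2): list-repetition with a nonpositive count is the empty list, hence .toNat
def solution_alt (food : List Int) : String :=
  let tokens := (PySem.List.pyRange 1 (PySem.List.len food) 1).foldl
    (fun toks i =>
      toks ++ List.replicate (PySem.Int.floordiv (PySem.List.pyGetD food i 0) 2).toNat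
        (PySem.Int.toStr i)) []
  PySem.Str.join "" tokens ++ "0" ++ PySem.Str.join "" tokens.reverse

-- ===== PRECONDITION & SPEC =====
def Spec_solution (food : List Int) (out : String) : Prop := out = solution_alt food
instance (food : List Int) (out : String) : Decidable (Spec_solution food out) := by unfold Spec_solution; infer_instance

-- ===== CLAIM (what is proved, stated in full; the proofs are below) =====
def Claim_equal_solution : Prop := ∀ (food : List Int), Dom_solution food → Spec_solution food (solution food)

-- ===== LEMMAS AND PROOFS =====

-- the per-index token block, with food fixed
def pvTok (food : List Int) (i : Int) : List String :=
  List.replicate (PySem.Int.floordiv (PySem.List.pyGetD food i 0) 2).toNat (PySem.Int.toStr i)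

theorem pvJoin_nil : PySem.Str.join "" ([] : List String) = "" := by
  apply String.toList_inj.mp; simp [PySem.Chars.join_nil]

theorem pvJoin_cons (s : String) (l : List String) :
    PySem.Str.join "" (s :: l) = s ++ PySem.Str.join "" l := by
  apply String.toList_inj.mp
  cases l with
  | nil => simp [PySem.Chars.join_singleton, PySem.Chars.join_nil]
  | cons t r => simp [PySem.Chars.join_cons_cons]

theorem pvJoin_append (l₁ l₂ : List String) :
    PySem.Str.join "" (l₁ ++ l₂) = PySem.Str.join "" l₁ ++ PySem.Str.join "" l₂ := by
  induction l₁ with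
  | nil => simp [pvJoin_nil]
  | cons s t ih => simp [pvJoin_cons, ih, String.append_assoc]

-- the join of a replicate commutes with one more copy of its element
theorem pvJoin_rep_comm (s : String) (m : Nat) :
    PySem.Str.join "" (List.replicate m s) ++ s = s ++ PySem.Str.join "" (List.replicate m s) := by
  induction m with
  | zero => rw [List.replicate_zero, pvJoin_nil]; simp
  | succ k ih =>
      rw [List.replicate_succ, pvJoin_cons, String.append_assoc, ih, ← String.append_assoc]

-- a fold that ignores the elements depends only on the length
theorem pvFoldl_const {α β : Type} (f : β → β) (l : List α) (b : β) :
    l.foldl (fun acc _ => f acc) b = f^[l.length] b := by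
  induction l generalizing b with
  | nil => rfl
  | cons x t ih => simp [List.foldl_cons, ih, Function.iterate_succ_apply]

-- the inner wrapping loop, run n times
theorem pvWrap_iter (s a : String) (n : Nat) :
    (fun ans => s ++ ans ++ s)^[n] a
      = PySem.Str.join "" (List.replicate n s) ++ a ++ PySem.Str.join "" (List.replicate n s) := by
  induction n generalizing a with
  | zero => simp [pvJoin_nil]
  | succ m ih =>
      rw [Function.iterate_succ_apply, ih, List.replicate_succ, pvJoin_cons]
      simp only [← String.append_assoc]
      rw [pvJoin_rep_comm]

-- one step of A's outer loop equals a two-sided join-wrap by pvTok (also when n = 0)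
theorem pvStep (food : List Int) (i : Int) (a : String) :
    (let n := PySem.Int.floordiv (PySem.List.pyGetD food i 0) 2
     if n ≠ 0 then
       (PySem.List.pyRange 0 n 1).foldl
         (fun ans _ => PySem.Int.toStr i ++ ans ++ PySem.Int.toStr i) a
     else a)
    = PySem.Str.join "" (pvTok food i) ++ a ++ PySem.Str.join "" (pvTok food i) := by
  by_cases h : PySem.Int.floordiv (PySem.List.pyGetD food i 0) 2 = 0
  · show (if _ ≠ (0:Int) then _ else a) = _
    rw [if_neg (not_not_intro h)]
    unfold pvTok
    rw [h]
    simp [pvJoin_nil]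
  · show (if _ ≠ (0:Int) then _ else a) = _
    rw [if_pos h, pvFoldl_const, PySem.List.length_pyRange_one]
    unfold pvTok
    rw [show ((PySem.Int.floordiv (PySem.List.pyGetD food i 0) 2) - 0 : Int)
          = PySem.Int.floordiv (PySem.List.pyGetD food i 0) 2 from by ring, pvWrap_iter]

-- A's outer fold over any index list
theorem pvOuter (food : List Int) (l : List Int) (a : String) :
    l.foldl
      (fun answer i =>
        let n := PySem.Int.floordiv (PySem.List.pyGetD food i 0) 2
        if n ≠ 0 then
          (PySem.List.pyRange 0 n 1).foldl
            (fun ans _ => PySem.Int.toStr i ++ ans ++ PySem.Int.toStr i) answer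
        else answer)
      a
    = PySem.Str.join "" (l.reverse.flatMap (pvTok food)) ++ a
        ++ PySem.Str.join "" (l.flatMap (pvTok food)) := by
  induction l generalizing a with
  | nil => simp [pvJoin_nil]
  | cons i t ih =>
      rw [List.foldl_cons, pvStep, ih]
      simp [pvJoin_append, String.append_assoc]

-- B's token accumulation is a flatMap
theorem pvTokens (food : List Int) (l : List Int) (acc : List String) :
    l.foldl
      (fun toks i =>
        toks ++ List.replicate (PySem.Int.floordiv (PySem.List.pyGetD food i 0) 2).toNat
          (PySem.Int.toStr i)) acc
    = acc ++ l.flatMap (pvTok food) := by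
  induction l generalizing acc with
  | nil => simp
  | cons i t ih =>
      rw [List.foldl_cons, ih, List.flatMap_cons, ← List.append_assoc]
      rfl

-- reversing the token list is flatMap over the reversed index list (each block is constant)
theorem pvRev_flatMap (food : List Int) (l : List Int) :
    (l.flatMap (pvTok food)).reverse = l.reverse.flatMap (pvTok food) := by
  rw [List.reverse_flatMap]
  congr 1
  funext i
  simp [pvTok]

-- ===== VERDICT (by name: the statement is the Claim_ definition above) =====
theorem solution_spec : Claim_equal_solution := by
  intro food _
  show solution food = solution_alt food
  rw [solution, solution_alt, pvOuter, pvTokens]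
  rw [PySem.List.pyRange_neg_one_eq_reverse]
  have h : PySem.List.len food - 1 + 1 = PySem.List.len food := by ring
  rw [h, List.reverse_reverse, ← pvRev_flatMap]
  simp
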